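-- pv_equiv track=rewrite | github.com/darsa-group/flat-bug | src/flat_bug/geometric.py | calculate_tile_offsets
-- ===== SOURCE A (Python) =====
-- import math
-- from itertools import accumulate
-- from typing import List, Tuple, Union
--
-- def equal_allocate_overlaps(total: int, segments: int, size: int) -> List[int]:
--     """
--     Generates cumulative positions for placing segments of a given size within a total length, with controlled overlaps.
--
--     This function divides the specified `total` length into `segments` positions, ensuring each segment (of given `size`) fits
--     evenly by introducing a small overlap between adjacent segments. The overlap is distributed uniformly, with the first few gaps
--     adjusted slightly to ensure the segments collectively sum to `total`.
--
--     Args: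
--         total (int): The total length to be covered by the segments. This is the target cumulative length the segments should fit into.
--         segments (int): The number of segments to place within the total length.
--             Must be greater than or equal to 2.
--         size (int): The desired size of each segment, used to determine the ideal spacing between segments.
--
--     Returns:
--         List[int]: A list of cumulative positions (starting from 0) where each segment should be placed.
--             These positions are spaced with controlled overlaps to ensure they collectively cover the `total` length.
--
--     Example:
--         >>> equal_allocate_overlaps(1000, 5, 250)
--         [0, 187, 374, 562, 750]
--     """
--     if segments < 2:
--         return [0] * segments
--
--     overlap = segments * size - total
--     partial_overlap, remainder = divmod(overlap, segments - 1)
--     distance = size - partial_overlap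
--
--     return list(accumulate([distance - (1 if i < remainder else 0) for i in range(segments - 1)], initial=0))
--
-- def calculate_tile_offsets(
--         image_size=(int, int),
--         tile_size=int,
--         minimum_overlap=int
--     ) -> List[Tuple[Tuple[int, int], Tuple[int, int]]]:
--     w, h = image_size
--     x_n_tiles = math.ceil((w - minimum_overlap) / (tile_size - minimum_overlap)) if w != tile_size else 1
--     y_n_tiles = math.ceil((h - minimum_overlap) / (tile_size - minimum_overlap)) if h != tile_size else 1
--
--     x_range = equal_allocate_overlaps(w, x_n_tiles, tile_size)
--     y_range = equal_allocate_overlaps(h, y_n_tiles, tile_size)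
--
--     return [((m, n), (j, i)) for n, j in enumerate(y_range) for m, i in enumerate(x_range)]
-- ===== SOURCE B (Python) =====
-- def calculate_tile_offsets(image_size=(int, int), tile_size=int, minimum_overlap=int):
--     w, h = image_size
--
--     def n_tiles(length):
--         # exact integer ceiling division, no float round-trip
--         if length == tile_size:
--             return 1
--         return -((minimum_overlap - length) // (tile_size - minimum_overlap))
--
--     def positions(total, segments):
--         # closed form for each position: j*distance minus one for each of the
--         # first `remainder` gaps already passed
--         if segments < 2:
--             return [0] * segments
--         partial_overlap, remainder = divmod(segments * tile_size - total, segments - 1)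
--         distance = tile_size - partial_overlap
--         return [j * distance - min(j, remainder) for j in range(segments)]
--
--     xs = positions(w, n_tiles(w))
--     ys = positions(h, n_tiles(h))
--     return [((m, n), (ys[n], xs[m])) for n in range(len(ys)) for m in range(len(xs))]
-- ===== Notes on version B (the rewrite author's own statement) =====
-- stated objective: simpler
-- what changed: equal_allocate_overlaps's left-to-right itertools.accumulate of per-gap distances is replaced by a direct closed form per index (j*distance - min(j, remainder)), the float math.ceil by exact integer ceiling division, and the enumerate-based grid comprehension by plain index ranges.
-- outside the precondition, e.g. on calculate_tile_offsets((5, 5), 3, 3): A raises ZeroDivisionError, B raises ZeroDivisionError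
import Mathlib
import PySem

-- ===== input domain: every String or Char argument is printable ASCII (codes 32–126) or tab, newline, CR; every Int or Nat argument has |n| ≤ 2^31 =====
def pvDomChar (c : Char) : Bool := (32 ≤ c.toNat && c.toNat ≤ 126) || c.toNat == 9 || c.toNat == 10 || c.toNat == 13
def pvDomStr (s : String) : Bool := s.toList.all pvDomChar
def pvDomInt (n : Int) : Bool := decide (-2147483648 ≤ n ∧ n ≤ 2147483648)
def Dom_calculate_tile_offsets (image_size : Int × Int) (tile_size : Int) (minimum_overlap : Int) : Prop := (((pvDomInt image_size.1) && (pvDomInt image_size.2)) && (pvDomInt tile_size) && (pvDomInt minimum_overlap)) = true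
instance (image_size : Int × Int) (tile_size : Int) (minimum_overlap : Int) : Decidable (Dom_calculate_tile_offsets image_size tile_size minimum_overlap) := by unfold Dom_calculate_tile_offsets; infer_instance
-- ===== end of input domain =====

-- B replaces the helper's running accumulation with a closed form per index and the
-- enumerate-based grid with direct index ranges (objective: simpler).

-- ===== PORT A =====
-- one step of A's accumulate loop: append the running total plus the next gap
def pvAccStep (distance remainder : Int) (acc : List Int × Int) (i : Int) : List Int × Int :=
  (acc.1 ++ [acc.2 + (distance - (if i < remainder then 1 else 0))],
   acc.2 + (distance - (if i < remainder then 1 else 0)))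

-- equal_allocate_overlaps: [0]*segments guard, then accumulate of per-gap distances with initial=0
def equal_allocate_overlaps_A (total : Int) (segments : Int) (size : Int) : List Int :=
  if segments < 2 then PySem.List.pyRepeat [0] segments
  else
    let overlap := segments * size - total
    let partial_overlap := PySem.Int.floordiv overlap (segments - 1)
    let remainder := PySem.Int.mod overlap (segments - 1)
    let distance := size - partial_overlap
    ((PySem.List.pyRange 0 (segments - 1)).foldl (pvAccStep distance remainder) ([0], 0)).1

-- math.ceil((w-m)/(t-m)) on Python floats is exact for |ints| ≤ 2^31 (the rounding error of the
-- division is smaller than the distance of the true quotient to any integer), ported as -((-p)//q)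
def calculate_tile_offsets (image_size : Int × Int) (tile_size : Int) (minimum_overlap : Int) : List ((Int × Int) × (Int × Int)) :=
  let w := image_size.1
  let h := image_size.2
  let x_n_tiles := if w ≠ tile_size then -(PySem.Int.floordiv (-(w - minimum_overlap)) (tile_size - minimum_overlap)) else 1
  let y_n_tiles := if h ≠ tile_size then -(PySem.Int.floordiv (-(h - minimum_overlap)) (tile_size - minimum_overlap)) else 1
  let x_range := equal_allocate_overlaps_A w x_n_tiles tile_size
  let y_range := equal_allocate_overlaps_A h y_n_tiles tile_size
  (PySem.List.enumerate y_range).flatMap (fun p =>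
    (PySem.List.enumerate x_range).map (fun q => ((q.1, p.1), (p.2, q.2))))

-- ===== PORT B =====
def pv_n_tiles (tile_size : Int) (minimum_overlap : Int) (length : Int) : Int :=
  if length = tile_size then 1
  else -(PySem.Int.floordiv (minimum_overlap - length) (tile_size - minimum_overlap))

def pv_positions (tile_size : Int) (total : Int) (segments : Int) : List Int :=
  if segments < 2 then PySem.List.pyRepeat [0] segments
  else
    let partial_overlap := PySem.Int.floordiv (segments * tile_size - total) (segments - 1)
    let remainder := PySem.Int.mod (segments * tile_size - total) (segments - 1)
    let distance := tile_size - partial_overlap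
    (PySem.List.pyRange 0 segments).map (fun j => j * distance - min j remainder)

def calculate_tile_offsets_alt (image_size : Int × Int) (tile_size : Int) (minimum_overlap : Int) : List ((Int × Int) × (Int × Int)) :=
  let w := image_size.1
  let h := image_size.2
  let xs := pv_positions tile_size w (pv_n_tiles tile_size minimum_overlap w)
  let ys := pv_positions tile_size h (pv_n_tiles tile_size minimum_overlap h)
  (PySem.List.pyRange 0 (PySem.List.len ys)).flatMap (fun n =>
    (PySem.List.pyRange 0 (PySem.List.len xs)).map (fun m =>
      ((m, n), (PySem.List.pyGetD ys n 0, PySem.List.pyGetD xs m 0))))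

-- ===== PRECONDITION & SPEC =====
-- Pre_ excludes exactly the inputs where Python A raises ZeroDivisionError:
-- tile_size == minimum_overlap while some image dimension differs from tile_size.
def Pre_calculate_tile_offsets (image_size : Int × Int) (tile_size : Int) (minimum_overlap : Int) : Prop :=
  tile_size ≠ minimum_overlap ∨ (image_size.1 = tile_size ∧ image_size.2 = tile_size)
instance (image_size : Int × Int) (tile_size : Int) (minimum_overlap : Int) : Decidable (Pre_calculate_tile_offsets image_size tile_size minimum_overlap) := by unfold Pre_calculate_tile_offsets; infer_instance
def pvWitness_calculate_tile_offsets : (Int × Int) × Int × Int := ((250, 180), 100, 50)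

def Spec_calculate_tile_offsets (image_size : Int × Int) (tile_size : Int) (minimum_overlap : Int) (out : List ((Int × Int) × (Int × Int))) : Prop := out = calculate_tile_offsets_alt image_size tile_size minimum_overlap
instance (image_size : Int × Int) (tile_size : Int) (minimum_overlap : Int) (out : List ((Int × Int) × (Int × Int))) : Decidable (Spec_calculate_tile_offsets image_size tile_size minimum_overlap out) := by unfold Spec_calculate_tile_offsets; infer_instance

-- ===== CLAIM (what is proved, stated in full; the proofs are below) =====
def Claim_equal_calculate_tile_offsets : Prop := ∀ (image_size : Int × Int) (tile_size : Int) (minimum_overlap : Int), Dom_calculate_tile_offsets image_size tile_size minimum_overlap → Pre_calculate_tile_offsets image_size tile_size minimum_overlap → Spec_calculate_tile_offsets image_size tile_size minimum_overlap (calculate_tile_offsets image_size tile_size minimum_overlap)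

-- ===== LEMMAS AND PROOFS =====

-- invariant of A's accumulate loop: after n steps the state is (all n+1 closed-form
-- positions, the last one), where position j = j*d - min j r
lemma pv_acc_invariant (d r : Int) (hr : 0 ≤ r) (n : Nat) :
    (((List.range n).map (fun k : Nat => (k : Int))).foldl (pvAccStep d r) ([0], 0))
    = ((List.range (n + 1)).map (fun j : Nat => (j : Int) * d - min (j : Int) r),
       (n : Int) * d - min (n : Int) r) := by
  induction n with
  | zero =>
      have h0 : min (0 : Int) r = 0 := by omega
      simp [List.range_one, h0]
  | succ n ih =>
      rw [List.range_succ]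
      simp only [List.map_append, List.foldl_append, ih, List.map_cons, List.map_nil,
        List.foldl_cons, List.foldl_nil, pvAccStep]
      have key : (n : Int) * d - min (n : Int) r + (d - if (n : Int) < r then 1 else 0)
          = ((n + 1 : Nat) : Int) * d - min ((n + 1 : Nat) : Int) r := by
        push_cast
        split_ifs with h
        · have m1 : min (n : Int) r = (n : Int) := by omega
          have m2 : min ((n : Int) + 1) r = (n : Int) + 1 := by omega
          rw [m1, m2]; ring
        · have m1 : min (n : Int) r = r := by omega
          have m2 : min ((n : Int) + 1) r = r := by omega
          rw [m1, m2]; ring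
      rw [key]
      refine Prod.ext ?_ rfl
      rw [List.range_succ (n := n + 1)]
      simp

-- the two helpers agree everywhere
lemma pv_positions_eq (total segments size : Int) :
    equal_allocate_overlaps_A total segments size = pv_positions size total segments := by
  simp only [equal_allocate_overlaps_A, pv_positions]
  split_ifs with h
  · rfl
  · have hr : 0 ≤ PySem.Int.mod (segments * size - total) (segments - 1) :=
      PySem.Int.mod_nonneg _ (by omega)
    have hpr1 : PySem.List.pyRange 0 (segments - 1)
        = (List.range (segments - 1).toNat).map (fun k : Nat => (k : Int)) := by
      conv_lhs => rw [show segments - 1 = (((segments - 1).toNat : Nat) : Int) by omega]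
      exact PySem.List.pyRange_zero_natCast _
    have hpr2 : PySem.List.pyRange 0 segments
        = (List.range ((segments - 1).toNat + 1)).map (fun k : Nat => (k : Int)) := by
      conv_lhs => rw [show segments = ((((segments - 1).toNat + 1 : Nat)) : Int) by omega]
      exact PySem.List.pyRange_zero_natCast _
    rw [hpr1, hpr2, pv_acc_invariant _ _ hr, List.map_map]
    rfl

-- the enumerate-based grid equals the index-range grid
lemma pv_grid_eq (xs ys : List Int) :
    (PySem.List.enumerate ys).flatMap (fun p =>
      (PySem.List.enumerate xs).map (fun q => ((q.1, p.1), (p.2, q.2))))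
    = (PySem.List.pyRange 0 (PySem.List.len ys)).flatMap (fun n =>
        (PySem.List.pyRange 0 (PySem.List.len xs)).map (fun m =>
          ((m, n), (PySem.List.pyGetD ys n 0, PySem.List.pyGetD xs m 0)))) := by
  rw [PySem.List.enumerate_eq_map_pyRange ys 0, PySem.List.enumerate_eq_map_pyRange xs 0]
  rw [List.flatMap_map]
  simp only [List.map_map]
  rfl

-- ===== VERDICT (by name: the statement is the Claim_ definition above) =====
theorem calculate_tile_offsets_spec : Claim_equal_calculate_tile_offsets := by
  intro image_size tile_size minimum_overlap _ _
  unfold Spec_calculate_tile_offsets calculate_tile_offsets calculate_tile_offsets_alt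
  simp only [pv_positions_eq]
  rw [pv_grid_eq]
  have hx : (if image_size.1 ≠ tile_size then
        -(PySem.Int.floordiv (-(image_size.1 - minimum_overlap)) (tile_size - minimum_overlap)) else 1)
      = pv_n_tiles tile_size minimum_overlap image_size.1 := by
    unfold pv_n_tiles
    by_cases h : image_size.1 = tile_size <;> simp [h]
  have hy : (if image_size.2 ≠ tile_size then
        -(PySem.Int.floordiv (-(image_size.2 - minimum_overlap)) (tile_size - minimum_overlap)) else 1)
      = pv_n_tiles tile_size minimum_overlap image_size.2 := by
    unfold pv_n_tiles
    by_cases h : image_size.2 = tile_size <;> simp [h]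
  rw [hx, hy]
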